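-- pv_equiv track=rewrite | github.com/matthias-bs/MicroPython-BresserWeatherSensorReceiver | src/bresser_decoder.py | lfsr_digest16
-- ===== SOURCE A (Python) =====
-- def lfsr_digest16(message, num_bytes, gen, key):
--     """
--     Calculate LFSR-16 digest.
--
--     Ported from rtl_433 project:
--     https://github.com/merbanan/rtl_433/blob/master/src/util.c
--
--     Args:
--         message: Message buffer
--         num_bytes: Number of bytes to process
--         gen: Generator polynomial
--         key: Initial key value
--
--     Returns:
--         LFSR-16 digest
--     """
--     _sum = 0
--     for k in range(num_bytes):
--         data = message[k]
--         for i in range(7, -1, -1):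
--             # if data bit is set then xor with key
--             if (data >> i) & 1:
--                 _sum ^= key
--
--             # roll the key right (actually the lsb is dropped here)
--             # and apply the gen (needs to include the dropped lsb as msb)
--             if key & 1:
--                 key = (key >> 1) ^ gen
--             else:
--                 key = (key >> 1)
--     return _sum
-- ===== SOURCE B (Python) =====
-- def lfsr_digest16(message, num_bytes, gen, key):
--     n = max(num_bytes, 0)
--     # pass 1: data-independent key schedule (key value BEFORE each advance), one entry per bit step
--     schedule = []
--     k = key
--     for _ in range(8 * n):
--         schedule.append(k)
--         k = (k >> 1) ^ gen if k & 1 else k >> 1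
--     # pass 2: xor into the sum the schedule entry of every set data bit (MSB first)
--     s = 0
--     for j, byte in enumerate(message[:n]):
--         for i in range(8):
--             if (byte >> (7 - i)) & 1:
--                 s ^= schedule[8 * j + i]
--     return s
-- ===== Notes on version B (the rewrite author's own statement) =====
-- stated objective: alternative
-- what changed: A interleaves sum and key in one nested loop over message bits; B first materializes the data-independent key schedule (one LFSR state per bit step) in a separate pass, then a second pass xors the schedule entry of every set data bit into the sum.
import Mathlib
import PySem

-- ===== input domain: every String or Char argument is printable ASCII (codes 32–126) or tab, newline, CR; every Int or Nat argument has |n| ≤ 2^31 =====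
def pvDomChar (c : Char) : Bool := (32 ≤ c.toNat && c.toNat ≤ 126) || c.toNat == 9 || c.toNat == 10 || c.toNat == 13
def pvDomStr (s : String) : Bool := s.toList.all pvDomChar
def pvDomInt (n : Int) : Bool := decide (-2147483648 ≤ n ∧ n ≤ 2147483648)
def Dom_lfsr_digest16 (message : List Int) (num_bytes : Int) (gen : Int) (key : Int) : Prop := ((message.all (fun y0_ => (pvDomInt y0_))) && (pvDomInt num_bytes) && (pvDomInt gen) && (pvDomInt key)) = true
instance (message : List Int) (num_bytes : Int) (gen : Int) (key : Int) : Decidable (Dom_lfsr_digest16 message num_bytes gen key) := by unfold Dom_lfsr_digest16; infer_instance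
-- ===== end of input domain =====

-- B replaces A's interleaved sum/key loop by two separate passes — precompute the data-independent
-- key schedule, then xor schedule entries at set data bits — same cost, different decomposition.

-- ===== PORT A =====
def lfsr_digest16 (message : List Int) (num_bytes : Int) (gen : Int) (key : Int) : Int :=
  -- for k in range(num_bytes): data = message[k]; for i in range(7,-1,-1): …
  -- (i ≥ 0 throughout the inner range, so `i.toNat` is Python's exact shift amount)
  (((PySem.List.pyRange 0 num_bytes 1).foldl
    (fun (st : Int × Int) k =>
      let data := PySem.List.pyGetD message k 0   -- message[k]; in range under Pre_
      (PySem.List.pyRange 7 (-1) (-1)).foldl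
        (fun (st : Int × Int) i =>
          let s := if PySem.Int.band (data >>> i.toNat) 1 ≠ 0 then PySem.Int.bxor st.1 st.2 else st.1
          let key := if PySem.Int.band st.2 1 ≠ 0 then PySem.Int.bxor (st.2 >>> 1) gen else st.2 >>> 1
          (s, key)) st)
    (0, key)).1)

-- ===== PORT B =====
-- B-side helper: the key schedule of Source B's first loop (entry = key value before each advance)
def pvSched (gen : Int) : Int → Nat → List Int
  | _, 0 => []
  | k, m + 1 => k :: pvSched gen (if PySem.Int.band k 1 ≠ 0 then PySem.Int.bxor (k >>> 1) gen else k >>> 1) m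

def lfsr_digest16_alt (message : List Int) (num_bytes : Int) (gen : Int) (key : Int) : Int :=
  let n : Int := max num_bytes 0
  let schedule := pvSched gen key (8 * n.toNat)   -- for _ in range(8*n): append k; advance k
  (PySem.List.enumerate (PySem.List.slice message none (some n))).foldl
    (fun (s : Int) jb =>
      (PySem.List.pyRange 0 8 1).foldl
        (fun (s : Int) i =>
          if PySem.Int.band (jb.2 >>> (7 - i).toNat) 1 ≠ 0 then
            PySem.Int.bxor s (PySem.List.pyGetD schedule (8 * jb.1 + i) 0)   -- schedule[8*j+i]; in range
          else s) s)
    0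

-- ===== PRECONDITION & SPEC =====
-- Pre_: A indexes message[k] for k in range(num_bytes), so it raises IndexError iff num_bytes > len(message).
def Pre_lfsr_digest16 (message : List Int) (num_bytes : Int) (gen : Int) (key : Int) : Prop :=
  num_bytes ≤ (message.length : Int)
instance (message : List Int) (num_bytes : Int) (gen : Int) (key : Int) : Decidable (Pre_lfsr_digest16 message num_bytes gen key) := by unfold Pre_lfsr_digest16; infer_instance
def pvWitness_lfsr_digest16 : List Int × Int × Int × Int := ([0xEA, 0xDC, 0x7A], 3, 0x8810, 0xABF9)

def Spec_lfsr_digest16 (message : List Int) (num_bytes : Int) (gen : Int) (key : Int) (out : Int) : Prop := out = lfsr_digest16_alt message num_bytes gen key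
instance (message : List Int) (num_bytes : Int) (gen : Int) (key : Int) (out : Int) : Decidable (Spec_lfsr_digest16 message num_bytes gen key out) := by unfold Spec_lfsr_digest16; infer_instance

-- ===== CLAIM (what is proved, stated in full; the proofs are below) =====
def Claim_equal_lfsr_digest16 : Prop := ∀ (message : List Int) (num_bytes : Int) (gen : Int) (key : Int), Dom_lfsr_digest16 message num_bytes gen key → Pre_lfsr_digest16 message num_bytes gen key → Spec_lfsr_digest16 message num_bytes gen key (lfsr_digest16 message num_bytes gen key)

-- ===== LEMMAS AND PROOFS =====

-- the LFSR key advance, shared by both analyses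
def pvStep (gen k : Int) : Int :=
  if PySem.Int.band k 1 ≠ 0 then PySem.Int.bxor (k >>> 1) gen else k >>> 1

-- key after t advances
def pvKIter (gen : Int) : Nat → Int → Int
  | 0, k => k
  | t + 1, k => pvKIter gen t (pvStep gen k)

-- bit n of byte d
def pvBit (d : Int) (n : Nat) : Bool := PySem.Int.band (d >>> (n : Int)) 1 != 0

-- key values xor-ed into the sum while scanning bits m-1 … 0 (MSB first), bit test C
def pvHitsN (gen : Int) (C : Nat → Bool) : Nat → Int → List Int
  | 0, _ => []
  | m + 1, k => (if C m then [k] else []) ++ pvHitsN gen C m (pvStep gen k)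

-- the same, for a whole byte list
def pvHits (gen : Int) : List Int → Int → List Int
  | [], _ => []
  | d :: ds, k => pvHitsN gen (pvBit d) 8 k ++ pvHits gen ds (pvKIter gen 8 k)

-- canonical form of A's per-byte inner loop
def pvAByte (gen : Int) (st : Int × Int) (d : Int) : Int × Int :=
  (PySem.List.pyRange 7 (-1) (-1)).foldl
    (fun (st : Int × Int) i =>
      (if pvBit d i.toNat then PySem.Int.bxor st.1 st.2 else st.1, pvStep gen st.2)) st

theorem pv_foldl_opt (c : Prop) [Decidable c] (s k : Int) :
    List.foldl PySem.Int.bxor s (if c then [k] else []) = if c then PySem.Int.bxor s k else s := by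
  split <;> simp

theorem pvKIter_succ' (gen : Int) (t : Nat) (k : Int) :
    pvKIter gen (t + 1) k = pvStep gen (pvKIter gen t k) := by
  induction t generalizing k with
  | zero => rfl
  | succ t ih => exact ih (pvStep gen k)

theorem pvKIter_add (gen : Int) (a b : Nat) (k : Int) :
    pvKIter gen (a + b) k = pvKIter gen b (pvKIter gen a k) := by
  induction a generalizing k with
  | zero => simp [pvKIter]
  | succ a ih =>
      rw [show a + 1 + b = a + b + 1 by omega]
      simp only [pvKIter]
      exact ih (pvStep gen k)

theorem pvSched_cons (gen k : Int) (m : Nat) :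
    pvSched gen k (m + 1) = k :: pvSched gen (pvStep gen k) m := rfl

theorem pvSched_get (gen : Int) (m t : Nat) (k : Int) (ht : t < m) :
    PySem.List.pyGetD (pvSched gen k m) (t : Int) 0 = pvKIter gen t k := by
  induction m generalizing t k with
  | zero => omega
  | succ m ih =>
      rw [pvSched_cons]
      cases t with
      | zero => simp [pvKIter]
      | succ t =>
          have h1 := ih t (pvStep gen k) (by omega)
          rw [PySem.List.pyGetD_natCast] at h1 ⊢
          simpa [pvKIter] using h1

-- A's inner loop shape, for any loop body F that acts like one LFSR bit step
theorem pvA_innerGen (gen : Int) (F : Int × Int → Int → Int × Int) (C : Nat → Bool)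
    (hF : ∀ (st : Int × Int) (i : Int), 0 ≤ i →
      F st i = (if C i.toNat then PySem.Int.bxor st.1 st.2 else st.1, pvStep gen st.2)) :
    ∀ (m : Nat) (s k : Int),
      (PySem.List.pyRange ((m : Int) - 1) (-1) (-1)).foldl F (s, k)
      = ((pvHitsN gen C m k).foldl PySem.Int.bxor s, pvKIter gen m k) := by
  intro m
  induction m with
  | zero =>
      intro s k
      rw [PySem.List.pyRange_neg_one_eq_nil (by norm_num)]
      simp [pvHitsN, pvKIter]
  | succ m ih =>
      intro s k
      rw [show (((m + 1 : Nat)) : Int) - 1 = (m : Int) by push_cast; ring,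
          PySem.List.pyRange_neg_one_cons (by omega), List.foldl_cons,
          hF (s, k) (m : Int) (by positivity), Int.toNat_natCast]
      simp only [pvHitsN, pvKIter]
      rw [List.foldl_append, pv_foldl_opt]
      exact ih _ (pvStep gen k)

theorem pvAByte_spec (gen : Int) (st : Int × Int) (d : Int) :
    pvAByte gen st d
    = ((pvHitsN gen (pvBit d) 8 st.2).foldl PySem.Int.bxor st.1, pvKIter gen 8 st.2) := by
  have h := pvA_innerGen gen
    (fun (st : Int × Int) i =>
      (if pvBit d i.toNat then PySem.Int.bxor st.1 st.2 else st.1, pvStep gen st.2))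
    (pvBit d) (fun _ _ _ => rfl) 8 st.1 st.2
  rw [show (((8 : Nat)) : Int) - 1 = (7 : Int) by norm_num] at h
  exact h

theorem pvAByte_bytes (gen : Int) (ys : List Int) :
    ∀ (s k : Int),
      ys.foldl (pvAByte gen) (s, k)
      = ((pvHits gen ys k).foldl PySem.Int.bxor s, pvKIter gen (8 * ys.length) k) := by
  induction ys with
  | nil => intro s k; simp [pvHits, pvKIter]
  | cons d ds ih =>
      intro s k
      rw [List.foldl_cons, pvAByte_spec, ih]
      simp only [pvHits, List.foldl_append, List.length_cons, Prod.mk.injEq]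
      exact ⟨trivial, by rw [show 8 * (ds.length + 1) = 8 + 8 * ds.length by ring, pvKIter_add]⟩

-- A's outer range loop turned into a fold of G over the processed prefix
theorem pvA_prefixGen {F : Int × Int → Int → Int × Int} (message : List Int) (num_bytes : Int)
    (G : Int × Int → Int → Int × Int) (init : Int × Int)
    (hnb : num_bytes ≤ (message.length : Int))
    (hFG : ∀ (st : Int × Int) (kk : Int), 0 ≤ kk → kk < num_bytes →
      F st kk = G st (PySem.List.pyGetD message kk 0)) :
    (PySem.List.pyRange 0 num_bytes 1).foldl F init
    = (message.take num_bytes.toNat).foldl G init := by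
  rw [PySem.List.foldl_congr_mem _ F
      (fun st kk => G st (PySem.List.pyGetD message kk 0)) init ?_]
  · rcases le_or_gt num_bytes 0 with h | h
    · rw [PySem.List.pyRange_one_eq_nil h]
      simp [show num_bytes.toNat = 0 by omega]
    · have hlen : (message.take num_bytes.toNat).length = num_bytes.toNat := by
        rw [List.length_take]; omega
      conv_lhs => rw [show num_bytes = (((message.take num_bytes.toNat).length : Nat) : Int) by
        rw [hlen]; omega]
      rw [← PySem.List.foldl_pyRange_zero_pyGetD' (message.take num_bytes.toNat) 0 G init]
      apply PySem.List.foldl_congr_mem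
      intro st kk hkk
      have hmem := (PySem.List.mem_pyRange_one).1 hkk
      congr 1
      rw [show kk = ((kk.toNat : Nat) : Int) by omega,
          PySem.List.pyGetD_natCast, PySem.List.pyGetD_natCast]
      have hlt : kk.toNat < num_bytes.toNat := by
        have h2 := hmem.2; rw [hlen] at h2; omega
      simp [List.getD_eq_getElem?_getD, hlt]
  · intro acc x hx
    have hmem := (PySem.List.mem_pyRange_one).1 hx
    exact hFG acc x hmem.1 hmem.2

-- B's inner loop shape, for any loop body G that xors the right schedule entries
theorem pvB_innerGen (gen : Int) (G : Int → Int → Int) (C : Nat → Bool) (k0 : Int)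
    (hG : ∀ (s i : Int), 0 ≤ i → i < 8 →
      G s i = if C (7 - i).toNat then PySem.Int.bxor s (pvKIter gen i.toNat k0) else s) :
    ∀ (m : Nat), m ≤ 8 → ∀ s : Int,
      (PySem.List.pyRange ((8 : Int) - (m : Int)) 8 1).foldl G s
      = (pvHitsN gen C m (pvKIter gen (8 - m) k0)).foldl PySem.Int.bxor s := by
  intro m
  induction m with
  | zero =>
      intro _ s
      rw [PySem.List.pyRange_one_eq_nil (by norm_num)]
      simp [pvHitsN]
  | succ m ih =>
      intro hm s
      rw [PySem.List.pyRange_one_cons (by push_cast; omega), List.foldl_cons,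
          hG s _ (by push_cast; omega) (by push_cast; omega),
          show ((7 : Int) - ((8 : Int) - (((m + 1 : Nat)) : Int))).toNat = m by omega,
          show ((8 : Int) - (((m + 1 : Nat)) : Int)).toNat = 8 - (m + 1) by omega,
          show (8 : Int) - (((m + 1 : Nat)) : Int) + 1 = (8 : Int) - ((m : Nat) : Int) by
            push_cast; ring]
      simp only [pvHitsN]
      rw [show pvStep gen (pvKIter gen (8 - (m + 1)) k0) = pvKIter gen (8 - m) k0 by
            rw [← pvKIter_succ']; congr 1; omega,
          List.foldl_append, pv_foldl_opt]
      exact ih (by omega) _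

theorem pvB_innerGen8 (gen : Int) (G : Int → Int → Int) (C : Nat → Bool) (k0 : Int)
    (hG : ∀ (s i : Int), 0 ≤ i → i < 8 →
      G s i = if C (7 - i).toNat then PySem.Int.bxor s (pvKIter gen i.toNat k0) else s)
    (s : Int) :
    (PySem.List.pyRange 0 8 1).foldl G s = (pvHitsN gen C 8 k0).foldl PySem.Int.bxor s := by
  have h := pvB_innerGen gen G C k0 hG 8 le_rfl s
  rw [show (8 : Int) - (((8 : Nat)) : Int) = 0 by norm_num] at h
  exact h

-- B's outer loop over enumerate, for any loop body H that digests one byte per step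
theorem pvB_bytesGen (gen k : Int) (H : Int → Int × Int → Int) :
    ∀ (ys : List Int) (j0 : Nat) (s : Int),
      (∀ (s : Int) (j : Nat) (d : Int), j < j0 + ys.length →
        H s (((j : Nat) : Int), d)
        = (pvHitsN gen (pvBit d) 8 (pvKIter gen (8 * j) k)).foldl PySem.Int.bxor s) →
      (PySem.List.enumerate ys ((j0 : Nat) : Int)).foldl H s
      = (pvHits gen ys (pvKIter gen (8 * j0) k)).foldl PySem.Int.bxor s := by
  intro ys
  induction ys with
  | nil => intro j0 s _; simp [PySem.List.enumerate_nil, pvHits]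
  | cons d ds ih =>
      intro j0 s hH
      rw [PySem.List.enumerate_cons, List.foldl_cons,
          hH s j0 d (by rw [List.length_cons]; omega),
          show ((j0 : Nat) : Int) + 1 = (((j0 + 1 : Nat)) : Int) by push_cast; ring,
          ih (j0 + 1) _ (fun s j d hj => hH s j d (by rw [List.length_cons]; omega))]
      simp only [pvHits, List.foldl_append]
      rw [show 8 * (j0 + 1) = 8 * j0 + 8 by ring, pvKIter_add]

theorem pvB_bytes0 (gen k : Int) {H : Int → Int × Int → Int} {ys : List Int} {s : Int}
    (hH : ∀ (s : Int) (j : Nat) (d : Int), j < ys.length →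
      H s (((j : Nat) : Int), d)
      = (pvHitsN gen (pvBit d) 8 (pvKIter gen (8 * j) k)).foldl PySem.Int.bxor s) :
    (PySem.List.enumerate ys 0).foldl H s
    = (pvHits gen ys k).foldl PySem.Int.bxor s := by
  have h := pvB_bytesGen gen k H ys 0 s (by simpa using hH)
  simpa [pvKIter] using h

-- main equivalence
theorem pv_main (message : List Int) (num_bytes gen key : Int)
    (hnb : num_bytes ≤ (message.length : Int)) :
    lfsr_digest16 message num_bytes gen key = lfsr_digest16_alt message num_bytes gen key := by
  simp only [lfsr_digest16, lfsr_digest16_alt]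
  rw [pvA_prefixGen message num_bytes (pvAByte gen) ((0 : Int), key) hnb ?hFG,
      pvAByte_bytes,
      show PySem.List.slice message none (some (max num_bytes 0)) = message.take num_bytes.toNat by
        rw [show max num_bytes 0 = ((num_bytes.toNat : Nat) : Int) by omega,
            PySem.List.slice_to _ (by positivity), Int.toNat_natCast],
      show (max num_bytes 0).toNat = num_bytes.toNat by omega,
      pvB_bytes0 gen key ?hH]
  case hFG =>
    intro st kk h0 hlt
    simp only [pvAByte, pvBit, pvStep, Int.shiftRight_natCast_right, bne_iff_ne]
  case hH =>
    intro s j d hj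
    have hjn : j < num_bytes.toNat := by
      have := hj
      rw [List.length_take] at this
      omega
    rw [pvB_innerGen8 gen _ (pvBit d) (pvKIter gen (8 * j) key) ?hG s]
    case hG =>
      intro s i h0 h8
      have hget : PySem.List.pyGetD (pvSched gen key (8 * num_bytes.toNat)) (8 * ((j : Nat) : Int) + i) 0
          = pvKIter gen i.toNat (pvKIter gen (8 * j) key) := by
        rw [show 8 * ((j : Nat) : Int) + i = (((8 * j + i.toNat : Nat)) : Int) by push_cast; omega,
            pvSched_get gen _ _ key (by omega), ← pvKIter_add]
      simp only [hget, pvBit, bne_iff_ne, Int.shiftRight_natCast_right]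

-- ===== VERDICT (by name: the statement is the Claim_ definition above) =====
theorem lfsr_digest16_spec : Claim_equal_lfsr_digest16 := by
  intro message num_bytes gen key _ hpre
  exact pv_main message num_bytes gen key hpre
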